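-- pv_equiv track=rewrite | github.com/ajnirp/advent-2024 | python/9.py | FreeSectors
-- ===== SOURCE A (Python) =====
-- def FreeSectors(disk):
--     start, end = 0, 0
--     result = []
--     while True:
--         while start < len(disk) and disk[start] != -1:
--             start += 1
--         if start == len(disk):
--             return result
--         end = start
--         while end < len(disk) and disk[end] == -1:
--             end += 1
--         result.append((start, end))
--         if end == len(disk):
--             return result
--         start = end
--     return result
-- ===== SOURCE B (Python) =====
-- def FreeSectors(disk):
--     result = []
--     run_start = None
--     for i, v in enumerate(disk):
--         if v == -1:
--             if run_start is None:
--                 run_start = i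
--         else:
--             if run_start is not None:
--                 result.append((run_start, i))
--                 run_start = None
--     if run_start is not None:
--         result.append((run_start, len(disk)))
--     return result
-- ===== Notes on version B (the rewrite author's own statement) =====
-- stated objective: simpler
-- what changed: Replaced A's outer while-True with two nested index-advancing while loops by a single state-machine pass over enumerate(disk) carrying a run_start sentinel, with one flush after the loop.
import Mathlib
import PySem

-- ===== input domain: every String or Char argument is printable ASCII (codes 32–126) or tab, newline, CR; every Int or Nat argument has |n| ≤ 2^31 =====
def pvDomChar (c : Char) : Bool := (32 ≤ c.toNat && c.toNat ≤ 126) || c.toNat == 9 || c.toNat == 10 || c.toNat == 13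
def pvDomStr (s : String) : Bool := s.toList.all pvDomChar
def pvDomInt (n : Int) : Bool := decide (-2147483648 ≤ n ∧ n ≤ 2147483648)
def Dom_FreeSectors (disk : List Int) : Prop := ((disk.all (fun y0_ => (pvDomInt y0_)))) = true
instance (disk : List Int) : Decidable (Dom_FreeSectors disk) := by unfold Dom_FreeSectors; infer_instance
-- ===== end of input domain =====

-- B replaces A's nested index-advancing while loops by a single state-machine pass with a run_start sentinel (objective: simpler).

-- ===== PORT A =====
-- inner loop `while start < len(disk) and disk[start] != -1: start += 1`
def pvSkipNe (disk : List Int) (s : Nat) : Nat :=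
  if h : s < disk.length ∧ disk.getD s 0 ≠ -1 then pvSkipNe disk (s + 1) else s
termination_by disk.length - s
decreasing_by omega

-- inner loop `while end < len(disk) and disk[end] == -1: end += 1`
def pvSkipEq (disk : List Int) (e : Nat) : Nat :=
  if h : e < disk.length ∧ disk.getD e 0 = -1 then pvSkipEq disk (e + 1) else e
termination_by disk.length - e
decreasing_by omega

theorem pvSkipNe_ge (disk : List Int) (s : Nat) : s ≤ pvSkipNe disk s := by
  fun_induction pvSkipNe disk s with
  | case1 s h ih => omega
  | case2 s h => omega

theorem pvSkipNe_le (disk : List Int) (s : Nat) (h : s ≤ disk.length) :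
    pvSkipNe disk s ≤ disk.length := by
  fun_induction pvSkipNe disk s with
  | case1 s h ih => exact ih (by omega)
  | case2 s h2 => omega

theorem pvSkipEq_ge (disk : List Int) (e : Nat) : e ≤ pvSkipEq disk e := by
  fun_induction pvSkipEq disk e with
  | case1 e h ih => omega
  | case2 e h => omega

theorem pvSkipEq_le (disk : List Int) (e : Nat) (h : e ≤ disk.length) :
    pvSkipEq disk e ≤ disk.length := by
  fun_induction pvSkipEq disk e with
  | case1 e h ih => exact ih (by omega)
  | case2 e h2 => omega

-- needed by pvALoop's decreasing_by: where the first inner loop stops inside the disk, it stops on a -1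
theorem pvSkipNe_eqNeg (disk : List Int) (s : Nat) :
    s ≤ disk.length → pvSkipNe disk s ≠ disk.length → disk.getD (pvSkipNe disk s) 0 = -1 := by
  fun_induction pvSkipNe disk s with
  | case1 s h ih => exact fun _ hne => ih (by omega) hne
  | case2 s h =>
      intro hs hne
      rcases not_and_or.mp h with h' | h'
      · omega
      · exact not_not.mp h'

theorem pvSkipEq_gt (disk : List Int) (e : Nat) (hlt : e < disk.length)
    (hval : disk.getD e 0 = -1) : e < pvSkipEq disk e := by
  have : pvSkipEq disk e = pvSkipEq disk (e + 1) := by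
    rw [pvSkipEq, dif_pos ⟨hlt, hval⟩]
  have := pvSkipEq_ge disk (e + 1)
  omega

-- the outer `while True` loop of A (start carries the invariant start ≤ len, true in Python)
def pvALoop (disk : List Int) (start : Nat) (result : List (Int × Int))
    (hs : start ≤ disk.length) : List (Int × Int) :=
  if h1 : pvSkipNe disk start = disk.length then result
  else if h2 : pvSkipEq disk (pvSkipNe disk start) = disk.length then
    result ++ [((pvSkipNe disk start : Int), (pvSkipEq disk (pvSkipNe disk start) : Int))]
  else
    pvALoop disk (pvSkipEq disk (pvSkipNe disk start))
      (result ++ [((pvSkipNe disk start : Int), (pvSkipEq disk (pvSkipNe disk start) : Int))])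
      (pvSkipEq_le disk _ (by have := pvSkipNe_le disk start hs; omega))
termination_by disk.length - start
decreasing_by
  have hge := pvSkipNe_ge disk start
  have hle := pvSkipNe_le disk start hs
  have hgt := pvSkipEq_gt disk (pvSkipNe disk start) (by omega)
    (pvSkipNe_eqNeg disk start hs h1)
  omega

def FreeSectors (disk : List Int) : List (Int × Int) :=
  pvALoop disk 0 [] (Nat.zero_le _)

-- ===== PORT B =====
-- the `for i, v in enumerate(disk)` loop: structural recursion over the list with index counter
def pvBLoop (i : Int) (result : List (Int × Int)) (run : Option Int) :
    List Int → List (Int × Int) × Option Int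
  | [] => (result, run)
  | v :: rest =>
    if v = -1 then
      match run with
      | none => pvBLoop (i + 1) result (some i) rest
      | some r => pvBLoop (i + 1) result (some r) rest
    else
      match run with
      | some r => pvBLoop (i + 1) (result ++ [(r, i)]) none rest
      | none => pvBLoop (i + 1) result none rest

def FreeSectors_alt (disk : List Int) : List (Int × Int) :=
  match pvBLoop 0 [] none disk with
  | (result, some r) => result ++ [(r, (disk.length : Int))]
  | (result, none) => result

-- ===== PRECONDITION & SPEC =====
def Spec_FreeSectors (disk : List Int) (out : List (Int × Int)) : Prop := out = FreeSectors_alt disk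
instance (disk : List Int) (out : List (Int × Int)) : Decidable (Spec_FreeSectors disk out) := by unfold Spec_FreeSectors; infer_instance

-- ===== CLAIM (what is proved, stated in full; the proofs are below) =====
def Claim_equal_FreeSectors : Prop := ∀ (disk : List Int), Dom_FreeSectors disk → Spec_FreeSectors disk (FreeSectors disk)

-- ===== LEMMAS AND PROOFS =====

theorem pvSkipEq_stop (disk : List Int) (e : Nat) :
    ¬ (pvSkipEq disk e < disk.length ∧ disk.getD (pvSkipEq disk e) 0 = -1) := by
  fun_induction pvSkipEq disk e with
  | case1 e h ih => exact ih
  | case2 e h2 => exact h2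

def pvFlush (disk : List Int) : List (Int × Int) × Option Int → List (Int × Int)
  | (result, some r) => result ++ [(r, (disk.length : Int))]
  | (result, none) => result

theorem pvDrop_cons (disk : List Int) (s : Nat) (h : s < disk.length) :
    disk.drop s = disk.getD s 0 :: disk.drop (s + 1) := by
  rw [List.drop_eq_getElem_cons h, List.getD_eq_getElem disk 0 h]

-- bLoop in state `none` skips exactly the elements pvSkipNe skips
theorem pvBLoop_skipNe (disk : List Int) (s : Nat) (res : List (Int × Int)) :
    pvBLoop (s : Int) res none (disk.drop s)
      = pvBLoop (pvSkipNe disk s : Int) res none (disk.drop (pvSkipNe disk s)) := by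
  fun_induction pvSkipNe disk s with
  | case1 s h ih =>
      rw [pvDrop_cons disk s h.1]
      simp only [pvBLoop, if_neg h.2]
      rw [show ((s : Int) + 1) = ((s + 1 : Nat) : Int) by push_cast; ring]
      exact ih
  | case2 s h => rfl

-- bLoop in state `some r` skips exactly the elements pvSkipEq skips
theorem pvBLoop_skipEq (disk : List Int) (e : Nat) (res : List (Int × Int)) (r : Int) :
    pvBLoop (e : Int) res (some r) (disk.drop e)
      = pvBLoop (pvSkipEq disk e : Int) res (some r) (disk.drop (pvSkipEq disk e)) := by
  fun_induction pvSkipEq disk e with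
  | case1 e h ih =>
      rw [pvDrop_cons disk e h.1]
      simp only [pvBLoop, if_pos h.2]
      rw [show ((e : Int) + 1) = ((e + 1 : Nat) : Int) by push_cast; ring]
      exact ih
  | case2 e h => rfl

theorem pvMain (disk : List Int) (start : Nat) (res : List (Int × Int))
    (hs : start ≤ disk.length) :
    pvALoop disk start res hs
      = pvFlush disk (pvBLoop (start : Int) res none (disk.drop start)) := by
  fun_induction pvALoop disk start res hs with
  | case1 start res hs h1 =>
      rw [pvBLoop_skipNe, h1, List.drop_length]
      rfl
  | case2 start res hs h1 h2 =>
      have hle := pvSkipNe_le disk start hs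
      have hlt : pvSkipNe disk start < disk.length := by omega
      have hval := pvSkipNe_eqNeg disk start hs h1
      rw [pvBLoop_skipNe, pvDrop_cons disk _ hlt]
      simp only [pvBLoop, if_pos hval]
      have hstep : pvSkipEq disk (pvSkipNe disk start)
          = pvSkipEq disk (pvSkipNe disk start + 1) := by
        rw [pvSkipEq, dif_pos ⟨hlt, hval⟩]
      rw [show ((pvSkipNe disk start : Int) + 1) = ((pvSkipNe disk start + 1 : Nat) : Int) by
        push_cast; ring]
      rw [pvBLoop_skipEq, ← hstep, h2, List.drop_length]
      rfl
  | case3 start res hs h1 h2 ih =>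
      have hle := pvSkipNe_le disk start hs
      have hlt : pvSkipNe disk start < disk.length := by omega
      have hval := pvSkipNe_eqNeg disk start hs h1
      have hele := pvSkipEq_le disk (pvSkipNe disk start) (by omega)
      have helt : pvSkipEq disk (pvSkipNe disk start) < disk.length := by omega
      have heval : disk.getD (pvSkipEq disk (pvSkipNe disk start)) 0 ≠ -1 := by
        have := pvSkipEq_stop disk (pvSkipNe disk start)
        by_contra hc
        exact this ⟨helt, hc⟩
      rw [pvBLoop_skipNe disk start res, pvDrop_cons disk (pvSkipNe disk start) hlt]
      simp only [pvBLoop, if_pos hval]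
      have hstep : pvSkipEq disk (pvSkipNe disk start)
          = pvSkipEq disk (pvSkipNe disk start + 1) := by
        rw [pvSkipEq, dif_pos ⟨hlt, hval⟩]
      rw [show ((pvSkipNe disk start : Int) + 1) = ((pvSkipNe disk start + 1 : Nat) : Int) by
        push_cast; ring]
      rw [pvBLoop_skipEq, ← hstep, pvDrop_cons disk _ helt]
      simp only [pvBLoop, if_neg heval]
      rw [show ((pvSkipEq disk (pvSkipNe disk start) : Int) + 1)
          = ((pvSkipEq disk (pvSkipNe disk start) + 1 : Nat) : Int) by push_cast; ring]
      rw [pvDrop_cons disk _ helt] at ih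
      simp only [pvBLoop, if_neg heval] at ih
      rw [show ((pvSkipEq disk (pvSkipNe disk start) : Int) + 1)
          = ((pvSkipEq disk (pvSkipNe disk start) + 1 : Nat) : Int) by push_cast; ring] at ih
      exact ih.symm ▸ rfl

-- ===== VERDICT (by name: the statement is the Claim_ definition above) =====
theorem FreeSectors_spec : Claim_equal_FreeSectors := by
  intro disk _
  unfold Spec_FreeSectors FreeSectors FreeSectors_alt
  rw [pvMain disk 0 [] (Nat.zero_le _)]
  simp only [List.drop_zero, Nat.cast_zero]
  cases pvBLoop 0 [] none disk with
  | mk r run => cases run <;> rfl
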